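-- pv_equiv track=rewrite | github.com/Vasilisa-Blyudova/2021-2-level-labs | lab_4/main.py | tokenize_by_letters
-- ===== SOURCE A (Python) =====
-- from typing import Tuple
--
-- def tokenize_by_letters(text: str) -> Tuple or int:
--     """
--     Tokenizes given sequence by letters
--     """
--     if not isinstance(text, str):
--         return -1
--     words = []
--     invaluable_trash = ('`', '~', '!', '@', '#', '$', '%', '^', '&', '*', '(', ')', '_', '-', '+',
--                         '=', '{', '[', ']', '}', '|', '\\', ':', ';', '"', "'", '<', ',', '>',
--                         '.', '?', '/', '1', '2', '3', '4', '5', '6', '7', '8', '9', '0')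
--     for symbol in invaluable_trash:
--         text = text.replace(symbol, '')
--     text = text.lower().split()
--     for word in text:
--         word_by_letter = []
--         for letter in word:
--             word_by_letter.append(letter)
--         word_by_letter.append('_')
--         word_by_letter.insert(0, '_')
--         words.append(word_by_letter)
--     text_tuple = tuple(tuple(word) for word in words)
--
--     return text_tuple
-- ===== SOURCE B (Python) =====
-- def tokenize_by_letters(text):
--     """
--     Tokenizes given sequence by letters (single pass over the characters).
--     """
--     if not isinstance(text, str):
--         return -1
--     trash = set('`~!@#$%^&*()_-+={[]}|\\:;"\'<,>.?/1234567890')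
--     words = []
--     cur = []
--     for ch in text:
--         if ch.isspace():
--             if cur:
--                 words.append(cur)
--                 cur = []
--         elif ch in trash:
--             continue
--         else:
--             cur.append(ch.lower())
--     if cur:
--         words.append(cur)
--     return tuple(tuple(['_'] + w + ['_']) for w in words)
-- ===== Notes on version B (the rewrite author's own statement) =====
-- stated objective: alternative
-- what changed: A makes 37 full-string replace passes (one per trash character), then lowercases the whole string and splits it; B makes a single pass over the characters with a current-word accumulator, flushing on whitespace, skipping trash characters and lowercasing letters as it goes.
import Mathlib
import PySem

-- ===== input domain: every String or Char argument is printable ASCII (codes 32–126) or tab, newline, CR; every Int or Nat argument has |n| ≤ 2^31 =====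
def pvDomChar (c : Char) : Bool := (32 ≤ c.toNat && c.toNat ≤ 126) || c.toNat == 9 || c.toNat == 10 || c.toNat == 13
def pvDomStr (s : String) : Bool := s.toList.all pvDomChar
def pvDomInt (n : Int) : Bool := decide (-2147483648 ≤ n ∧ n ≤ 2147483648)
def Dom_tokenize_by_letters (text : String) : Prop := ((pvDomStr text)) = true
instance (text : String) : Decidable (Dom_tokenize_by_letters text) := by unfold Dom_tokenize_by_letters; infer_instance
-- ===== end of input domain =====

-- B replaces A's 37 whole-string `replace` passes followed by lower+split with ONE pass over the
-- characters (flush on whitespace, skip trash, lowercase-and-accumulate otherwise); objective: alternative single-traversal algorithm.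


-- ===== PORT A =====
-- A's tuple of trash characters
def invaluable_trash_pv : List Char :=
  ['`', '~', '!', '@', '#', '$', '%', '^', '&', '*', '(', ')', '_', '-', '+',
   '=', '{', '[', ']', '}', '|', '\\', ':', ';', '"', '\'', '<', ',', '>',
   '.', '?', '/', '1', '2', '3', '4', '5', '6', '7', '8', '9', '0']

def tokenize_by_letters (text : String) : List (List String) :=
  -- for symbol in invaluable_trash: text = text.replace(symbol, '')
  let text1 := invaluable_trash_pv.foldl
    (fun t symbol => PySem.Str.replace t (String.ofList [symbol]) "") text
  -- text = text.lower().split()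
  let words := PySem.Str.split₀ (PySem.Str.lower text1)
  -- per-word letter loop, then append '_' and insert '_' at position 0
  words.map (fun word =>
    let word_by_letter := word.toList.foldl
      (fun acc letter => acc ++ [String.ofList [letter]]) ([] : List String)
    let word_by_letter := word_by_letter ++ ["_"]
    PySem.List.insert word_by_letter 0 "_")

-- ===== PORT B =====
-- B's trash set, written as the string literal Source B builds its set from
def pvTrashB : List Char := "`~!@#$%^&*()_-+={[]}|\\:;\"'<,>.?/1234567890".toList

-- one step of B's single pass: state = (finished words, current word accumulator)
def pvStepB (st : List (List Char) × List Char) (ch : Char) : List (List Char) × List Char :=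
  if PySem.Chars.isspace ch then
    (if st.2.isEmpty then st else (st.1 ++ [st.2], []))
  else if pvTrashB.contains ch then st
  else (st.1, st.2 ++ [PySem.Chars.lowerChar ch])

def tokenize_by_letters_alt (text : String) : List (List String) :=
  let st := text.toList.foldl pvStepB ([], [])
  let ws := if st.2.isEmpty then st.1 else st.1 ++ [st.2]
  ws.map (fun w => ["_"] ++ w.map (fun ch => String.ofList [ch]) ++ ["_"])

-- ===== PRECONDITION & SPEC =====
def Spec_tokenize_by_letters (text : String) (out : List (List String)) : Prop := out = tokenize_by_letters_alt text
instance (text : String) (out : List (List String)) : Decidable (Spec_tokenize_by_letters text out) := by unfold Spec_tokenize_by_letters; infer_instance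

-- ===== CLAIM (what is proved, stated in full; the proofs are below) =====
def Claim_equal_tokenize_by_letters : Prop := ∀ (text : String), Dom_tokenize_by_letters text → Spec_tokenize_by_letters text (tokenize_by_letters text)

-- ===== LEMMAS AND PROOFS =====

-- A's whitespace-splitting step without the trash/lower handling (the shape of split₀.go as a left fold)
def pvStep0 (st : List (List Char) × List Char) (ch : Char) : List (List Char) × List Char :=
  if PySem.Chars.isspace ch then
    (if st.2.isEmpty then st else (st.1 ++ [st.2], []))
  else (st.1, st.2 ++ [ch])

theorem pvTrashB_eq : pvTrashB = invaluable_trash_pv := by decide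

-- replacing a single character by '' is filtering it out
theorem replace_go_filter (c : Char) :
    ∀ (fuel : Nat) (l acc : List Char), l.length ≤ fuel →
    PySem.Chars.replace.go [c] [] fuel l acc = acc.reverse ++ l.filter (fun x => !(x == c)) := by
  intro fuel
  induction fuel with
  | zero =>
    intro l acc h
    have : l = [] := by cases l <;> simp_all
    subst this
    simp [PySem.Chars.replace.go]
  | succ n ih =>
    intro l acc h
    cases l with
    | nil => simp [PySem.Chars.replace.go]
    | cons x t =>
      rw [PySem.Chars.replace.go]
      by_cases hx : x = c
      · subst hx
        simp only [List.isPrefixOf, BEq.refl, Bool.and_self, if_pos, List.length_cons,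
          List.length_nil, List.drop_succ_cons, List.drop_zero, List.reverse_nil, List.nil_append]
        rw [ih t _ (by simpa using h)]
        simp
      · have : List.isPrefixOf [c] (x :: t) = false := by
          simp [List.isPrefixOf]
          exact fun hc => absurd hc.symm hx
        rw [this]
        simp only [Bool.false_eq_true, reduceIte]
        rw [ih t _ (by simpa using h)]
        simp [hx]

theorem replace_single (c : Char) (l : List Char) :
    PySem.Chars.replace l [c] [] = l.filter (fun x => !(x == c)) := by
  rw [PySem.Chars.replace]
  simp only [List.isEmpty_cons, Bool.false_eq_true, reduceIte]
  simpa using replace_go_filter c l.length l [] le_rfl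

-- A's foldl of replaces = one filter against the whole trash list
theorem foldl_replace_toList : ∀ (cs : List Char) (s : String),
    (cs.foldl (fun t symbol => PySem.Str.replace t (String.ofList [symbol]) "") s).toList
    = s.toList.filter (fun x => !(cs.contains x)) := by
  intro cs
  induction cs with
  | nil => intro s; simp
  | cons c cs ih =>
    intro s
    rw [List.foldl_cons, ih]
    rw [PySem.Str.toList_replace]
    simp only [String.toList_ofList]
    have : ("" : String).toList = [] := by decide
    rw [this, replace_single, List.filter_filter]
    apply List.filter_congr
    intro x _
    simp only [List.contains_cons, Bool.not_or]
    have : (x == c) = decide (c = x) := by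
      rw [Bool.beq_eq_decide_eq]
      simp [eq_comm]
    rw [this, Bool.and_comm]

theorem trash_not_space : ∀ c ∈ invaluable_trash_pv, PySem.Chars.isspace c = false := by
  intro c h
  unfold invaluable_trash_pv at h
  fin_cases h <;> decide

theorem isspace_false_of_range (c : Char) (h1 : 65 ≤ c.toNat) (h2 : c.toNat ≤ 122) :
    PySem.Chars.isspace c = false := by
  apply Bool.eq_false_iff.mpr
  intro h
  rw [PySem.Chars.isspace] at h
  simp only [Bool.or_eq_true, Bool.and_eq_true, decide_eq_true_eq] at h
  omega

theorem isspace_lowerChar (c : Char) :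
    PySem.Chars.isspace (PySem.Chars.lowerChar c) = PySem.Chars.isspace c := by
  rw [PySem.Chars.lowerChar]
  by_cases h : PySem.Chars.isupper c = true
  · rw [if_pos h]
    simp [PySem.Chars.isupper, Char.le_def, UInt32.le_iff_toNat_le] at h
    obtain ⟨h1, h2⟩ := h
    have hv : (c.toNat + 32).isValidChar := Or.inl (by omega)
    have ht : (Char.ofNat (c.toNat + 32)).toNat = c.toNat + 32 := by
      rw [Char.toNat_ofNat, if_pos hv]
    rw [isspace_false_of_range c h1 (by omega),
        isspace_false_of_range _ (by omega : 65 ≤ (Char.ofNat (c.toNat + 32)).toNat) (by omega)]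
  · rw [if_neg h]

theorem lowerChar_of_space (c : Char) (h : PySem.Chars.isspace c = true) :
    PySem.Chars.lowerChar c = c := by
  rw [PySem.Chars.lowerChar, if_neg]
  intro hu
  simp [PySem.Chars.isupper, Char.le_def, UInt32.le_iff_toNat_le] at hu
  rw [isspace_false_of_range c (by omega) (by omega)] at h
  exact Bool.false_ne_true h

-- split₀.go is the left fold pvStep0 plus a final flush
theorem split_go_fold : ∀ (cs cur : List Char) (acc : List (List Char)),
    PySem.Chars.split₀.go cs cur acc
    = (let st := cs.foldl pvStep0 (acc.reverse, cur.reverse)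
       if st.2.isEmpty then st.1 else st.1 ++ [st.2]) := by
  intro cs
  induction cs with
  | nil =>
    intro cur acc
    rw [PySem.Chars.split₀.go]
    cases cur with
    | nil => simp
    | cons c t => simp
  | cons c rest ih =>
    intro cur acc
    rw [PySem.Chars.split₀.go]
    by_cases hs : PySem.Chars.isspace c = true
    · rw [if_pos hs]
      by_cases he : cur.isEmpty = true
      · have : cur = [] := by cases cur <;> simp_all
        subst this
        rw [if_pos (by decide : ([] : List Char).isEmpty = true), ih [] acc]
        simp [pvStep0, hs]
      · rw [if_neg he]
        rw [ih [] (cur.reverse :: acc)]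
        have hne : cur.reverse.isEmpty = false := by cases cur <;> simp_all
        simp [pvStep0, hs, hne]
    · rw [if_neg hs, ih (c :: cur) acc]
      simp [pvStep0, hs]

-- B's fold over the raw text = the plain splitting fold over the cleaned, lowered text
theorem foldB_reduction : ∀ (l : List Char) (st : List (List Char) × List Char),
    l.foldl pvStepB st
    = ((l.filter (fun x => !(invaluable_trash_pv.contains x))).map PySem.Chars.lowerChar).foldl pvStep0 st := by
  intro l
  induction l with
  | nil => intro st; rfl
  | cons c t ih =>
    intro st
    rw [List.foldl_cons]
    by_cases hs : PySem.Chars.isspace c = true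
    · have hnm : c ∉ invaluable_trash_pv := by
        intro hm
        rw [trash_not_space c hm] at hs
        exact Bool.false_ne_true hs
      rw [List.filter_cons_of_pos (by simp [hnm])]
      rw [List.map_cons, lowerChar_of_space c hs, List.foldl_cons]
      rw [ih]
      congr 1
      simp [pvStepB, pvStep0, hs]
    · by_cases htr : invaluable_trash_pv.contains c = true
      · have hm : c ∈ invaluable_trash_pv := by simpa using htr
        rw [List.filter_cons_of_neg (by simp [hm])]
        rw [← ih]
        congr 1
        simp [pvStepB, hs, pvTrashB_eq, hm]
      · have hnm : c ∉ invaluable_trash_pv := by simpa using htr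
        rw [List.filter_cons_of_pos (by simp [hnm])]
        rw [List.map_cons, List.foldl_cons, ih]
        congr 1
        have hs' : PySem.Chars.isspace (PySem.Chars.lowerChar c) = false := by
          rw [isspace_lowerChar]; exact Bool.eq_false_iff.mpr hs
        simp [pvStepB, pvStep0, hs, hs', pvTrashB_eq, hnm]

theorem foldl_append_map (w : List Char) :
    ∀ (acc : List String),
    w.foldl (fun a letter => a ++ [String.ofList [letter]]) acc
    = acc ++ w.map (fun ch => String.ofList [ch]) := by
  induction w with
  | nil => intro acc; simp
  | cons c t ih => intro acc; simp [ih]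

theorem insert_zero (l : List String) (x : String) : PySem.List.insert l 0 x = x :: l := by
  simp [PySem.List.insert, PySem.List.sliceIndices]

-- ===== VERDICT (by name: the statement is the Claim_ definition above) =====
theorem tokenize_by_letters_spec : Claim_equal_tokenize_by_letters := by
  intro text _
  unfold Spec_tokenize_by_letters tokenize_by_letters tokenize_by_letters_alt
  simp only [PySem.Str.split₀, PySem.Chars.split₀]
  rw [split_go_fold, foldB_reduction]
  have htl : (PySem.Str.lower
      (invaluable_trash_pv.foldl (fun t symbol => PySem.Str.replace t (String.ofList [symbol]) "") text)).toList
      = (text.toList.filter (fun x => !(invaluable_trash_pv.contains x))).map PySem.Chars.lowerChar := by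
    rw [PySem.Str.toList_lower, foldl_replace_toList, PySem.Chars.lower]
  rw [htl]
  simp only [List.reverse_nil, List.map_map]
  apply List.map_congr_left
  intro w _
  simp only [Function.comp_apply, String.toList_ofList, foldl_append_map, List.nil_append, insert_zero]
  rfl
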